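-- pv_equiv track=rewrite | github.com/JoaoASouza/RTPhishingDetector | dig_to_csv.py | get_authority
-- ===== SOURCE A (Python) =====
-- def get_authority(content_arr):
--     isCounting = False
--     count = 0
--     for e in content_arr:
--         if ("AUTHORITY SECTION" in e):
--             isCounting = True
--             continue
--         if (isCounting and len(e) == 0):
--             break
--         if (isCounting):
--             count += 1
--     return count
-- ===== SOURCE B (Python) =====
-- def get_authority(content_arr):
--     marker_idxs = [i for i, e in enumerate(content_arr) if "AUTHORITY SECTION" in e]
--     if not marker_idxs:
--         return 0
--     section = [e for e in content_arr[min(marker_idxs) + 1:] if "AUTHORITY SECTION" not in e]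
--     return section.index("") if "" in section else len(section)
-- ===== Notes on version B (the rewrite author's own statement) =====
-- stated objective: alternative
-- what changed: Replaces A's single stateful pass (isCounting flag, counter, break) with a declarative staged computation: build the list of marker indices by comprehension, take its min as the section start, filter marker lines out of the tail slice, and return the index of the first empty line in that filtered list (or its length if none).
import Mathlib
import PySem

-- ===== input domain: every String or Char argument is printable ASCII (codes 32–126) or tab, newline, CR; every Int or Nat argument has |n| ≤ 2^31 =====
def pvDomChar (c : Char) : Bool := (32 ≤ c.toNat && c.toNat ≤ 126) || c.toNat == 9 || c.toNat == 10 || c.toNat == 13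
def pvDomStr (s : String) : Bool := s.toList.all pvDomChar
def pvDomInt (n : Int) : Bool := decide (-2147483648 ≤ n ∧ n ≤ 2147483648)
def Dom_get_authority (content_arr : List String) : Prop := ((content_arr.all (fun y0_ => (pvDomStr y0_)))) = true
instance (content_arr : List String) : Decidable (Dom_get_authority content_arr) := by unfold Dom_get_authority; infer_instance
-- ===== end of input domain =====

-- B replaces A's stateful flag/counter/break pass by a declarative staged computation
-- (marker indices by comprehension → min → filter the tail slice → index of first empty line); same cost, different shape.

-- ===== PORT A =====
-- A's for-loop with its isCounting/count state; returning early models 'break'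
def get_authority_goA (isCounting : Bool) (count : Int) : List String → Int
  | [] => count
  | e :: rest =>
    if PySem.Str.isIn "AUTHORITY SECTION" e then
      get_authority_goA true count rest
    else if isCounting && (PySem.Str.len e == 0) then
      count
    else if isCounting then
      get_authority_goA isCounting (count + 1) rest
    else
      get_authority_goA isCounting count rest

def get_authority (content_arr : List String) : Int :=
  get_authority_goA false 0 content_arr

-- ===== PORT B =====
def get_authority_alt (content_arr : List String) : Int :=
  -- marker_idxs = [i for i, e in enumerate(content_arr) if "AUTHORITY SECTION" in e]
  -- if not marker_idxs: return 0    (min? is none exactly on the empty list)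
  match PySem.List.min?
      (((PySem.List.enumerate content_arr 0).filter
        (fun p => PySem.Str.isIn "AUTHORITY SECTION" p.2)).map (fun p => p.1)) (fun x => x) with
  | none => 0
  | some start =>
    -- section = [e for e in content_arr[min(marker_idxs)+1:] if "AUTHORITY SECTION" not in e]
    -- return section.index("") if "" in section else len(section)
    match PySem.List.index?
        ((PySem.List.slice content_arr (some (start + 1)) none).filter
          (fun e => !(PySem.Str.isIn "AUTHORITY SECTION" e))) "" with
    | some k => (k : Int)
    | none => (((PySem.List.slice content_arr (some (start + 1)) none).filter
          (fun e => !(PySem.Str.isIn "AUTHORITY SECTION" e))).length : Int)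

-- ===== PRECONDITION & SPEC =====
def Spec_get_authority (content_arr : List String) (out : Int) : Prop := out = get_authority_alt content_arr
instance (content_arr : List String) (out : Int) : Decidable (Spec_get_authority content_arr out) := by unfold Spec_get_authority; infer_instance

-- ===== CLAIM (what is proved, stated in full; the proofs are below) =====
def Claim_equal_get_authority : Prop := ∀ (content_arr : List String), Dom_get_authority content_arr → Spec_get_authority content_arr (get_authority content_arr)

-- ===== LEMMAS AND PROOFS =====

-- A's loop with the marker test abstracted into P (so rewriting cannot unfold the substring test)
def pvGoGen (P : String → Bool) (isCounting : Bool) (count : Int) : List String → Int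
  | [] => count
  | e :: rest =>
    if P e then
      pvGoGen P true count rest
    else if isCounting && (PySem.Str.len e == 0) then
      count
    else if isCounting then
      pvGoGen P isCounting (count + 1) rest
    else
      pvGoGen P isCounting count rest

-- B's phase-2 value on a tail l: filter out markers, first empty line's index or the length
def pvCountB (P : String → Bool) (l : List String) : Int :=
  match PySem.List.index? (l.filter (fun e => !P e)) "" with
  | some k => (k : Int)
  | none => ((l.filter (fun e => !P e)).length : Int)

theorem goA_eq_goGen (l : List String) : ∀ (b : Bool) (n : Int),
    get_authority_goA b n l = pvGoGen (fun e => PySem.Str.isIn "AUTHORITY SECTION" e) b n l := by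
  induction l with
  | nil => intro b n; rfl
  | cons e rest ih =>
    intro b n
    simp only [get_authority_goA, pvGoGen]
    split_ifs <;> first | rfl | apply ih

-- once counting has started, the loop computes count + B's phase-2 value on the rest
theorem goGen_true (P : String → Bool) (l : List String) : ∀ (n : Int),
    pvGoGen P true n l = n + pvCountB P l := by
  induction l with
  | nil => intro n; simp [pvGoGen, pvCountB, PySem.List.index?]
  | cons e rest ih =>
    intro n
    simp only [pvGoGen]
    by_cases hm : P e
    · rw [if_pos hm, ih]
      have hfil : (e :: rest).filter (fun e => !P e) = rest.filter (fun e => !P e) :=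
        List.filter_cons_of_neg (by simp [hm])
      simp only [pvCountB, hfil]
    · by_cases he : e = ""
      · subst he
        rw [if_neg hm, if_pos (by decide)]
        have hfil : ("" :: rest).filter (fun e => !P e) = "" :: rest.filter (fun e => !P e) :=
          List.filter_cons_of_pos (by simp [hm])
        simp only [pvCountB, hfil, PySem.List.index?_cons_self]
        omega
      · have hlen : (PySem.Str.len e == 0) = false := by
          simp [PySem.Str.len_eq, he]
        rw [if_neg hm]
        simp only [Bool.true_and, hlen, if_true, Bool.false_eq_true, if_false, ih]
        have hfil : (e :: rest).filter (fun e => !P e) = e :: rest.filter (fun e => !P e) :=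
          List.filter_cons_of_pos (by simp [hm])
        simp only [pvCountB, hfil]
        rw [PySem.List.index?_cons_of_ne _ he]
        cases hf : PySem.List.index? (rest.filter (fun e => !P e)) "" with
        | none => simp only [Option.map_none, List.length_cons]; push_cast; ring
        | some k => simp only [Option.map_some]; push_cast; ring

-- elements of (enumerate xs s) have first component ≥ s
theorem enumerate_fst_ge (xs : List String) (s : Int) :
    ∀ p ∈ PySem.List.enumerate xs s, s ≤ p.1 := by
  intro p hp
  rcases (PySem.List.mem_enumerate_iff xs s p).mp hp with ⟨k, hk, rfl⟩
  simp

theorem foldl_min_of_le (t : List Int) : ∀ (s : Int), (∀ y ∈ t, s ≤ y) → t.foldl min s = s := by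
  induction t with
  | nil => intro s _; rfl
  | cons a t ih =>
    intro s h
    have : min s a = s := min_eq_left (h a (by simp))
    simp only [List.foldl_cons, this]
    exact ih s (fun y hy => h y (by simp [hy]))

-- B's phase 1: the min of the marker-index comprehension is the index of the first marker
theorem min_markers_eq (P : String → Bool) (c : List String) : ∀ (s : Int),
    PySem.List.min? (((PySem.List.enumerate c s).filter (fun p => P p.2)).map (fun p => p.1))
        (fun x => x)
      = (c.findIdx? P).map (fun i => s + (i : Int)) := by
  induction c with
  | nil => intro s; rfl
  | cons e rest ih =>
    intro s
    rw [PySem.List.enumerate_cons]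
    by_cases hm : P e
    · rw [List.filter_cons_of_pos (by simpa using hm)]
      simp only [List.map_cons]
      rw [PySem.List.min?_id_cons]
      have hge : ∀ y ∈ ((PySem.List.enumerate rest (s + 1)).filter
          (fun p => P p.2)).map (fun p => p.1), s ≤ y := by
        intro y hy
        simp only [List.mem_map, List.mem_filter] at hy
        rcases hy with ⟨p, ⟨hp, _⟩, rfl⟩
        have := enumerate_fst_ge rest (s + 1) p hp
        omega
      rw [foldl_min_of_le _ s hge]
      simp [List.findIdx?_cons, hm]
    · rw [List.filter_cons_of_neg (by simpa using hm)]
      rw [ih (s + 1)]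
      simp only [List.findIdx?_cons, hm]
      cases hf : rest.findIdx? P with
      | none => simp
      | some i => simp; ring

-- before the first marker, the loop is: find the marker, then run the counting loop on the tail
theorem goGen_false (P : String → Bool) (l : List String) : ∀ (n : Int),
    pvGoGen P false n l =
      match l.findIdx? P with
      | none => n
      | some i => pvGoGen P true n (l.drop (i + 1)) := by
  induction l with
  | nil => intro n; rfl
  | cons e rest ih =>
    intro n
    simp only [pvGoGen, List.findIdx?_cons]
    by_cases h : P e
    · simp only [h, if_true]
      rfl
    · simp only [h, Bool.false_and, ih n]
      cases hf : rest.findIdx? P <;> simp [List.drop_succ_cons]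

-- ===== VERDICT (by name: the statement is the Claim_ definition above) =====
theorem get_authority_spec : Claim_equal_get_authority := by
  intro content_arr _
  unfold Spec_get_authority get_authority get_authority_alt
  rw [goA_eq_goGen, goGen_false, min_markers_eq (fun e => PySem.Str.isIn "AUTHORITY SECTION" e) content_arr 0]
  cases hf : content_arr.findIdx? (fun e => PySem.Str.isIn "AUTHORITY SECTION" e) with
  | none => rfl
  | some i =>
    simp only [zero_add]
    have hsl : PySem.List.slice content_arr (some ((i : Int) + 1)) none = content_arr.drop (i + 1) := by
      have := PySem.List.slice_from_natCast content_arr (i + 1)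
      simpa using this
    rw [goGen_true]
    simp [hsl, pvCountB]
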